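-- pv_equiv track=rewrite | github.com/ConorMarco/Advent-of-code-2019 | 4.py | has_lonely_double
-- ===== SOURCE A (Python) =====
-- def has_lonely_double(n):
-- 	prev = None
-- 	count = 0
--
-- 	# Iterate through the digits of n from least to greatest, keeping track of how many we've seen in a row
-- 	while n >= 1:
-- 		if n % 10 == prev:
-- 			count += 1
-- 		else:
-- 			# We've hit the end of a streak of the same number
-- 			if count == 2:
-- 				return True
-- 			prev = n % 10
-- 			count = 1
--
-- 		# Move on to the next digit
-- 		n //= 10
-- 	return count == 2
-- ===== SOURCE B (Python) =====
-- from itertools import groupby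
--
--
-- def has_lonely_double(n):
--     return n > 0 and any(len(list(g)) == 2 for _, g in groupby(str(n)))
-- ===== Notes on version B (the rewrite author's own statement) =====
-- stated objective: idiomatic
-- what changed: Replaces the arithmetic digit-extraction loop with a manual streak counter by a groupby over the decimal string that materialises the maximal digit runs and asks whether any has length exactly 2.
import Mathlib
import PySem

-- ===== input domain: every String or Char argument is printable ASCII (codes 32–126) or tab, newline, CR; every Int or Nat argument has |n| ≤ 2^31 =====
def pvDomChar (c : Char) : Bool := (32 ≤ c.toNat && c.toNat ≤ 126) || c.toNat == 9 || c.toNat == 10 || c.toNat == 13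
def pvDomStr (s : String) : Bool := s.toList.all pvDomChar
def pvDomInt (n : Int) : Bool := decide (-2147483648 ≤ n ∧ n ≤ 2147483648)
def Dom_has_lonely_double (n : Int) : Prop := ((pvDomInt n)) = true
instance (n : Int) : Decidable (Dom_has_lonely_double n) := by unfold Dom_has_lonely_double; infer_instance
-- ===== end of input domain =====

-- B replaces A's arithmetic digit-extraction loop with a manual streak counter by a groupby
-- (maximal-run) pass over the decimal string, asking whether any run has length exactly 2.

-- ===== PORT A =====
-- A's while-loop: state (n, prev, count), scanning digits least-significant first.
def pvALoop (n : Int) (prev : Option Int) (count : Int) : Bool :=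
  if h : 1 ≤ n then
    if some (PySem.Int.mod n 10) == prev then
      pvALoop (PySem.Int.floordiv n 10) prev (count + 1)
    else
      if count == 2 then true
      else pvALoop (PySem.Int.floordiv n 10) (some (PySem.Int.mod n 10)) 1
  else
    count == 2
termination_by n.toNat
decreasing_by
  all_goals
    rw [PySem.Int.floordiv_eq_ediv_of_pos (by norm_num : (0:Int) < 10)]
    omega

def has_lonely_double (n : Int) : Bool := pvALoop n none 0

-- ===== PORT B =====
-- itertools.groupby(str(n)) forms the maximal runs of equal characters: List.splitBy (· == ·).
def has_lonely_double_alt (n : Int) : Bool :=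
  decide (0 < n) &&
    ((PySem.Int.toStr n).toList.splitBy (fun a b => a == b)).any (fun g => g.length == 2)

-- ===== PRECONDITION & SPEC =====
def Spec_has_lonely_double (n : Int) (out : Bool) : Prop := out = has_lonely_double_alt n
instance (n : Int) (out : Bool) : Decidable (Spec_has_lonely_double n out) := by unfold Spec_has_lonely_double; infer_instance

-- ===== CLAIM (what is proved, stated in full; the proofs are below) =====
def Claim_equal_has_lonely_double : Prop := ∀ (n : Int), Dom_has_lonely_double n → Spec_has_lonely_double n (has_lonely_double n)

-- ===== LEMMAS AND PROOFS =====

-- generic streak scan (the list form of A's loop), over any type with lawful ==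
def pvRunScan {α : Type} [BEq α] : List α → Option α → Int → Bool
  | [], _, count => count == 2
  | d :: ds, prev, count =>
    if some d == prev then pvRunScan ds prev (count + 1)
    else if count == 2 then true
    else pvRunScan ds (some d) 1

theorem pvALoop_nonpos (n : Int) (prev : Option Int) (count : Int) (h : ¬ 1 ≤ n) :
    pvALoop n prev count = (count == 2) := by
  unfold pvALoop; simp [h]

theorem pvALoop_eq_runScan (m : Nat) : ∀ (prev : Option Int) (count : Int),
    pvALoop (m : Int) prev count = pvRunScan ((Nat.digits 10 m).map Int.ofNat) prev count := by
  induction m using Nat.strong_induction_on with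
  | _ m IH =>
    intro prev count
    by_cases hm : 0 < m
    · rw [Nat.digits_def' (by norm_num : 1 < 10) hm]
      rw [pvALoop]
      rw [dif_pos (by omega : (1:Int) ≤ (m : Int))]
      have hmod : PySem.Int.mod (m : Int) 10 = ((m % 10 : Nat) : Int) := by
        rw [PySem.Int.mod_eq_emod_of_pos (by norm_num)]; omega
      have hdiv : PySem.Int.floordiv (m : Int) 10 = ((m / 10 : Nat) : Int) := by
        rw [PySem.Int.floordiv_eq_ediv_of_pos (by norm_num)]; omega
      rw [hmod, hdiv]
      simp only [List.map_cons, pvRunScan]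
      rw [show Int.ofNat (m % 10) = ((m % 10 : Nat) : Int) from rfl]
      have hlt : m / 10 < m := Nat.div_lt_self hm (by norm_num)
      split
      · exact IH _ hlt prev (count + 1)
      · split
        · rfl
        · exact IH _ hlt _ 1
    · have : m = 0 := by omega
      subst this
      rw [pvALoop]
      simp [pvRunScan]

-- injective-on-a-predicate transfer: pvRunScan sees only equality tests
theorem pvRunScan_map {α β : Type} [BEq α] [LawfulBEq α] [BEq β] [LawfulBEq β]
    (f : α → β) (P : α → Prop) (hf : ∀ a b, P a → P b → (f a = f b ↔ a = b)) :
    ∀ (l : List α) (prev : Option α) (count : Int), (∀ x ∈ l, P x) → (∀ x ∈ prev, P x) →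
    pvRunScan (l.map f) (prev.map f) count = pvRunScan l prev count := by
  intro l
  induction l with
  | nil => intro prev count _ _; rfl
  | cons d ds IH =>
    intro prev count hl hprev
    simp only [List.map_cons, pvRunScan]
    have hcond : (some (f d) == prev.map f) = (some d == prev) := by
      cases prev with
      | none => rfl
      | some p =>
        simp only [Option.map_some]
        by_cases h : d = p
        · simp [h]
        · have : ¬ f d = f p := fun hc =>
            h ((hf d p (hl d (by simp)) (hprev p (by simp))).mp hc)
          simp [h, this]
    rw [hcond]
    split
    · exact IH prev (count + 1) (fun x hx => hl x (by simp [hx])) hprev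
    · split
      · rfl
      · exact IH (some d) 1 (fun x hx => hl x (by simp [hx]))
          (fun x hx => by simp at hx; subst hx; exact hl d (by simp))

-- a chain of == is constant
theorem pvChainEq {α : Type} [BEq α] [LawfulBEq α] (a : α) (g : List α)
    (h : List.IsChain (fun x y => (x == y) = true) (a :: g)) : ∀ x ∈ g, x = a := by
  induction g generalizing a with
  | nil => simp
  | cons b g' IH =>
    rw [List.isChain_cons] at h
    obtain ⟨h1, h2⟩ := h
    have hba : b = a := by
      have := h1 b (by simp)
      exact (beq_iff_eq.mp this).symm
    intro x hx
    rcases List.mem_cons.mp hx with rfl | hx'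
    · exact hba
    · rw [← hba]; exact IH b h2 x hx'

-- consuming one maximal run from the middle of the scan
theorem pvRunScan_run {α : Type} [BEq α] [LawfulBEq α] (g : List α) :
    ∀ (rest : List α) (a : α) (c : Int), (∀ x ∈ g, x = a) →
    (∀ h ∈ rest.head?, (h == a) = false) →
    pvRunScan (g ++ rest) (some a) c = ((c + (g.length : Int) == 2) || pvRunScan rest none 0) := by
  induction g with
  | nil =>
    intro rest a c _ hrest
    cases rest with
    | nil => simp [pvRunScan]
    | cons b rest' =>
      have hba : (b == a) = false := hrest b (by simp)
      have h1 : (some b == some a) = false := by simp [hba]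
      have h2 : (some b == (none : Option α)) = false := rfl
      simp only [List.nil_append, List.length_nil, Nat.cast_zero, add_zero, pvRunScan, h1, h2]
      by_cases hc : c = 2 <;> simp [hc]
  | cons x g' IH =>
    intro rest a c hg hrest
    have hxa : x = a := hg x (by simp)
    simp only [List.cons_append, pvRunScan]
    rw [if_pos (by simp [hxa])]
    rw [IH rest a (c + 1) (fun y hy => hg y (by simp [hy])) hrest]
    congr 1
    simp only [List.length_cons]
    by_cases h2 : c + 1 + (g'.length : Int) = 2
    · simp [h2]; omega
    · have : ¬ (c + ((g'.length : Int) + 1) = 2) := by omega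
      simp [h2, this]

-- the scan over a flattened run decomposition
theorem pvRunScan_flatten {α : Type} [BEq α] [LawfulBEq α] (L : List (List α))
    (hn : [] ∉ L) (hc : ∀ g ∈ L, List.IsChain (fun x y => (x == y) = true) g)
    (hb : List.IsChain (fun g h => ∃ (hg : g ≠ []) (hh : h ≠ []),
        ((g.getLast hg == h.head hh) = false)) L) :
    pvRunScan L.flatten none 0 = L.any (fun g => g.length == 2) := by
  induction L with
  | nil => rfl
  | cons g L' IH =>
    have hgne : g ≠ [] := by rintro rfl; exact hn (by simp)
    obtain ⟨a, g', rfl⟩ := List.exists_cons_of_ne_nil hgne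
    have hall : ∀ x ∈ g', x = a := pvChainEq a g' (hc _ (by simp))
    have hhead : ∀ h ∈ (L'.flatten).head?, (h == a) = false := by
      intro h hh
      have hfl : L'.flatten ≠ [] := by
        rintro habs; rw [habs] at hh; simp at hh
      obtain ⟨h', L'', rfl⟩ := List.exists_cons_of_ne_nil (by rintro rfl; simp at hfl : L' ≠ [])
      have hh'ne : h' ≠ [] := by rintro rfl; exact hn (by simp)
      rw [List.isChain_cons] at hb
      obtain ⟨hb1, _⟩ := hb
      obtain ⟨hg1, hh1, hrel⟩ := hb1 h' (by simp)
      have : (h' :: L'').flatten.head? = h'.head? := by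
        cases h' with
        | nil => exact absurd rfl hh'ne
        | cons y ys => simp
      rw [this] at hh
      have hh2 : h = h'.head hh1 := by
        have := List.head?_eq_some_head hh1
        rw [this] at hh; simpa using hh.symm
      have hlast : (a :: g').getLast hg1 = a := by
        rcases List.getLast_mem hg1 with h3
        rcases List.mem_cons.mp h3 with h4 | h4
        · exact h4
        · exact hall _ h4
      rw [hh2, ← hlast]
      exact beq_eq_false_iff_ne.mpr (Ne.symm (beq_eq_false_iff_ne.mp hrel))
    simp only [List.flatten_cons, List.cons_append, pvRunScan, List.any_cons]
    have hcn : (some a == (none : Option α)) = false := rfl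
    rw [if_neg (by simp [hcn])]
    rw [if_neg (by norm_num)]
    rw [pvRunScan_run g' L'.flatten a 1 hall hhead]
    rw [IH (fun h => hn (by simp [h])) (fun g hg => hc g (by simp [hg])) hb.tail]
    congr 1
    have : ((1 + (g'.length : Int) == 2)) = ((a :: g').length == 2) := by
      simp only [List.length_cons]
      by_cases h : g'.length = 1
      · simp [h]
      · have e1 : ((1:Int) + (g'.length : Int) == 2) = false := beq_eq_false_iff_ne.mpr (by omega)
        have e2 : (g'.length + 1 == 2) = false := beq_eq_false_iff_ne.mpr (by omega)
        rw [e1, e2]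
    rw [this]

theorem pvRunScan_splitBy {α : Type} [BEq α] [LawfulBEq α] (l : List α) :
    pvRunScan l none 0 = (l.splitBy (fun a b => a == b)).any (fun g => g.length == 2) := by
  obtain ⟨hfl, hn, hc, hb⟩ :=
    List.splitBy_eq_iff (m := l) (r := fun a b => a == b)
      (l := l.splitBy (fun a b => a == b)) |>.mp rfl
  calc pvRunScan l none 0 = pvRunScan (l.splitBy (fun a b => a == b)).flatten none 0 := by
        rw [List.flatten_splitBy]
    _ = _ := pvRunScan_flatten _ hn hc hb

-- runs of the reversed list are the reversed reversed-runs
theorem pvSplitBy_reverse {α : Type} [BEq α] [LawfulBEq α] (l : List α) :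
    l.reverse.splitBy (fun a b => a == b)
      = ((l.splitBy (fun a b => a == b)).map List.reverse).reverse := by
  obtain ⟨hfl, hn, hc, hb⟩ :=
    List.splitBy_eq_iff (m := l) (r := fun a b => a == b)
      (l := l.splitBy (fun a b => a == b)) |>.mp rfl
  rw [List.splitBy_eq_iff]
  refine ⟨?_, ?_, ?_, ?_⟩
  · rw [← List.reverse_flatten, ← hfl]
  · intro hmem
    rw [List.mem_reverse, List.mem_map] at hmem
    obtain ⟨g, hg, hg0⟩ := hmem
    exact hn (by rwa [List.reverse_eq_nil_iff.mp hg0] at hg)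
  · intro m hm
    rw [List.mem_reverse, List.mem_map] at hm
    obtain ⟨g, hg, rfl⟩ := hm
    rw [List.isChain_reverse]
    exact (hc g hg).imp (fun a b h => beq_iff_eq.mpr (beq_iff_eq.mp h).symm)
  · rw [List.isChain_reverse, List.isChain_map]
    exact hb.imp (by
      intro g h hrel
      obtain ⟨hg, hh, hrel⟩ := hrel
      refine ⟨by simpa using hh, by simpa using hg, ?_⟩
      rw [List.getLast_reverse, List.head_reverse]
      exact beq_eq_false_iff_ne.mpr (Ne.symm (beq_eq_false_iff_ne.mp hrel)))

theorem pvAny_len2_reverse {α : Type} [BEq α] [LawfulBEq α] (l : List α) :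
    (l.reverse.splitBy (fun a b => a == b)).any (fun g => g.length == 2)
      = (l.splitBy (fun a b => a == b)).any (fun g => g.length == 2) := by
  rw [pvSplitBy_reverse, List.any_reverse, List.any_map]
  simp [Function.comp_def]

-- str(n) for n ≥ 1 is the reversed digitChar image of Nat.digits
theorem pvToDigitsCore_append (f : Nat) : ∀ (n : Nat) (ds : List Char),
    Nat.toDigitsCore 10 f n ds = Nat.toDigitsCore 10 f n [] ++ ds := by
  induction f with
  | zero => intro n ds; simp [Nat.toDigitsCore]
  | succ f IH =>
    intro n ds
    simp only [Nat.toDigitsCore]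
    by_cases h : n / 10 = 0
    · simp [h]
    · rw [if_neg h, if_neg h, IH (n / 10) [(n % 10).digitChar], IH (n / 10) ((n % 10).digitChar :: ds)]
      simp

theorem pvToDigitsCore_fuel (n : Nat) : ∀ (f₁ f₂ : Nat), n < f₁ → n < f₂ →
    Nat.toDigitsCore 10 f₁ n [] = Nat.toDigitsCore 10 f₂ n [] := by
  induction n using Nat.strong_induction_on with
  | _ n IH =>
    intro f₁ f₂ h1 h2
    obtain ⟨g₁, rfl⟩ := Nat.exists_eq_succ_of_ne_zero (by omega : f₁ ≠ 0)
    obtain ⟨g₂, rfl⟩ := Nat.exists_eq_succ_of_ne_zero (by omega : f₂ ≠ 0)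
    simp only [Nat.toDigitsCore]
    by_cases h : n / 10 = 0
    · simp [h]
    · rw [if_neg h, if_neg h,
        pvToDigitsCore_append g₁ (n / 10) [(n % 10).digitChar],
        pvToDigitsCore_append g₂ (n / 10) [(n % 10).digitChar]]
      have hd : n / 10 < n := Nat.div_lt_self (by omega) (by norm_num)
      rw [IH (n / 10) hd g₁ g₂ (by omega) (by omega)]

theorem pvToDigits_step (m : Nat) :
    Nat.toDigits 10 m =
      if m / 10 = 0 then [(m % 10).digitChar]
      else Nat.toDigits 10 (m / 10) ++ [(m % 10).digitChar] := by
  unfold Nat.toDigits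
  conv_lhs => simp only [Nat.toDigitsCore]
  by_cases h : m / 10 = 0
  · simp [h]
  · rw [if_neg h, if_neg h, pvToDigitsCore_append m (m / 10) [(m % 10).digitChar]]
    have hd : m / 10 < m := Nat.div_lt_self (by omega) (by norm_num)
    rw [pvToDigitsCore_fuel (m / 10) m (m / 10 + 1) (by omega) (by omega)]

theorem pvToDigits_eq (m : Nat) (hm : 0 < m) :
    Nat.toDigits 10 m = ((Nat.digits 10 m).map Nat.digitChar).reverse := by
  induction m using Nat.strong_induction_on with
  | _ m IH =>
    rw [Nat.digits_def' (by norm_num : 1 < 10) hm, pvToDigits_step]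
    by_cases h : m / 10 = 0
    · rw [if_pos h, h]
      simp
    · rw [if_neg h, IH (m / 10) (Nat.div_lt_self hm (by norm_num)) (by omega)]
      simp

theorem pvDigitChar_inj : ∀ a < 10, ∀ b < 10, (Nat.digitChar a = Nat.digitChar b ↔ a = b) := by
  decide

-- ===== VERDICT (by name: the statement is the Claim_ definition above) =====
theorem has_lonely_double_spec : Claim_equal_has_lonely_double := by
  intro n _
  unfold Spec_has_lonely_double has_lonely_double has_lonely_double_alt
  by_cases hn : 1 ≤ n
  · have hm : (0:Int) < n := hn
    have hrepr : n = ((n.toNat : Nat) : Int) := by omega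
    set m : Nat := n.toNat with hmdef
    have hm0 : 0 < m := by omega
    rw [hrepr]
    rw [pvALoop_eq_runScan m none 0]
    have h1 : pvRunScan ((Nat.digits 10 m).map Int.ofNat) (Option.map Int.ofNat none) 0
        = pvRunScan (Nat.digits 10 m) none 0 :=
      pvRunScan_map Int.ofNat (fun _ => True) (by intro a b _ _; exact ⟨fun h => Int.ofNat.inj h, fun h => by rw [h]⟩)
        _ none 0 (by simp) (by simp)
    have h2 : pvRunScan ((Nat.digits 10 m).map Nat.digitChar) (Option.map Nat.digitChar none) 0
        = pvRunScan (Nat.digits 10 m) none 0 :=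
      pvRunScan_map Nat.digitChar (fun d => d < 10)
        (fun a b ha hb => pvDigitChar_inj a ha b hb)
        _ none 0 (fun x hx => Nat.digits_lt_base (by norm_num) hx) (by simp)
    simp only [Option.map_none] at h1 h2
    rw [h1, ← h2, pvRunScan_splitBy]
    have htl : (PySem.Int.toStr ((m : Nat) : Int)).toList = ((Nat.digits 10 m).map Nat.digitChar).reverse := by
      rw [PySem.Int.toList_toStr]
      simp only [PySem.Int.toChars]
      rw [if_neg (by omega)]
      rw [show (((m:Nat):Int)).toNat = m by omega]
      exact pvToDigits_eq m hm0
    rw [htl, pvAny_len2_reverse]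
    simp [hm, hrepr.symm]
  · rw [pvALoop_nonpos n none 0 hn]
    have : ¬ (0:Int) < n := by omega
    simp [this]
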